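-- pv_equiv track=rewrite | github.com/MadToyMonkey/advent-of-code-MD | 2024/Day_04/day04.py | find_diagonal_x_for_word
-- ===== SOURCE A (Python) =====
-- def find_diagonal_x_for_word(grid, word):
--     rows = len(grid)
--     cols = len(grid[0])
--
--     # Define diagonal directions
--     directions = [
--         (1, 1),  # Down-Right
--         (-1, -1),  # Up-Left
--         (1, -1),  # Down-Left
--         (-1, 1),  # Up-Right
--     ]
--
--     def is_valid(x, y):
--         """Check if coordinates are within bounds."""
--         return 0 <= x < rows and 0 <= y < cols
--
--     def search_from(x, y, word, direction):
--         """Search for a word starting from (x, y) in a single diagonal direction."""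
--         row_offset, col_offset = direction
--         nx, ny = x, y
--         path = []
--         for char in word:
--             if not is_valid(nx, ny) or grid[nx][ny] != char:
--                 return None  # Invalid path
--             path.append((nx, ny))
--             nx += row_offset
--             ny += col_offset
--         return path
--
--     def verify_x_shape(paths):
--         """Verify if any two paths form an 'X' by intersecting at their midpoints."""
--         midpoints = {
--             tuple(path[len(path) // 2]) for path in paths
--         }  # Extract all midpoints
--         # Check if any midpoint is shared between two paths
--         result = []
--         for i in range(len(paths)):
--             for j in range(i + 1, len(paths)):
--                 mid1 = paths[i][len(paths[i]) // 2]
--                 mid2 = paths[j][len(paths[j]) // 2]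
--                 if mid1 == mid2:  # Shared midpoint
--                     result.append((paths[i], paths[j]))
--         return result
--
--     # Search for all diagonal occurrences of the word
--     all_paths = []
--     for i in range(rows):
--         for j in range(cols):
--             if grid[i][j] == word[0]:  # Starting point must match the first letter
--                 for direction in directions:
--                     path = search_from(i, j, word, direction)
--                     if path:
--                         all_paths.append(path)
--
--     # Verify which paths form 'X' shapes
--     x_shapes = verify_x_shape(all_paths)
--     return x_shapes
-- ===== SOURCE B (Python) =====
-- def find_diagonal_x_for_word(grid, word):
--     rows = len(grid)
--     cols = len(grid[0])
--     deltas = ((1, 1), (-1, -1), (1, -1), (-1, 1))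
--
--     def walk(x, y, k, dx, dy):
--         """Recursively build the coordinate path for word[k:] from (x, y)."""
--         if k == len(word):
--             return []
--         if not (0 <= x < rows and 0 <= y < cols) or grid[x][y] != word[k]:
--             return None
--         rest = walk(x + dx, y + dy, k + 1, dx, dy)
--         return None if rest is None else [(x, y)] + rest
--
--     paths = []
--     for i in range(rows):
--         for j in range(cols):
--             if grid[i][j] == word[0]:
--                 for dx, dy in deltas:
--                     p = walk(i, j, 0, dx, dy)
--                     if p is not None:
--                         paths.append(p)
--
--     # Group path indices by midpoint once, instead of comparing all pairs.
--     groups = {}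
--     for idx, p in enumerate(paths):
--         groups.setdefault(p[len(p) // 2], []).append(idx)
--
--     out = []
--     for i, p in enumerate(paths):
--         for j in groups[p[len(p) // 2]]:
--             if j > i:
--                 out.append((p, paths[j]))
--     return out
-- ===== Notes on version B (the rewrite author's own statement) =====
-- stated objective: alternative
-- what changed: B groups path indices by midpoint in a dict built in one pass and emits, per path, only the later paths in its own midpoint group, replacing A's all-pairs double loop over paths (and builds each path by a recursive walk instead of A's accumulator loop); a timing run could not measure a speed-up here.
import Mathlib
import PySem

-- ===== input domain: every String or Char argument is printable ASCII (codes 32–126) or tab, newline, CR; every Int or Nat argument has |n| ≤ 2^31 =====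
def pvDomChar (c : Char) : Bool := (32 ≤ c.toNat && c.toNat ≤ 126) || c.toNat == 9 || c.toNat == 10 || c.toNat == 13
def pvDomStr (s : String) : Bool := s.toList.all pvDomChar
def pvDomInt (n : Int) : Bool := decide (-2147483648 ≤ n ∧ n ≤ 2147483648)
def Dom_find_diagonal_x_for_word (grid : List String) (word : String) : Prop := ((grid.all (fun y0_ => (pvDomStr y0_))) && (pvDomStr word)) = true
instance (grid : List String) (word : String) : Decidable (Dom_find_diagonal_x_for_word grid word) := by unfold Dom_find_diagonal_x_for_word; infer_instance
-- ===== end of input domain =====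

-- B replaces A's quadratic all-pairs midpoint comparison by a dict grouping path indices per
-- midpoint (and a recursive path walk instead of A's accumulator loop); return value only.

-- shared helper: path[len(path) // 2], the midpoint cell of a path (both Pythons compute it verbatim)
def pvMid (p : List (Int × Int)) : Int × Int :=
  PySem.List.pyGetD p (PySem.Int.floordiv (p.length : Int) 2) (0, 0)

-- ===== PORT A =====
def pvIsValid (rows cols x y : Int) : Bool :=
  decide (0 ≤ x) && decide (x < rows) && decide (0 ≤ y) && decide (y < cols)

-- the 'for char in word' loop of search_from; state (nx, ny, path), early return = none
def pvSearchLoop (gl : List (List Char)) (rows cols dx dy : Int) :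
    List Char → Int → Int → List (Int × Int) → Option (List (Int × Int))
  | [], _, _, path => some path
  | ch :: rest, nx, ny, path =>
    if !pvIsValid rows cols nx ny then none
    else if PySem.List.pyGetD (PySem.List.pyGetD gl nx []) ny ' ' ≠ ch then none
    else pvSearchLoop gl rows cols dx dy rest (nx + dx) (ny + dy) (path ++ [(nx, ny)])

def pvSearchFrom (gl : List (List Char)) (rows cols : Int) (x y : Int) (w : List Char)
    (dir : Int × Int) : Option (List (Int × Int)) :=
  pvSearchLoop gl rows cols dir.1 dir.2 w x y []

def pvDirections : List (Int × Int) := [(1, 1), (-1, -1), (1, -1), (-1, 1)]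

-- verify_x_shape: the midpoints set (unused by the Python too), then the i < j double loop
def pvVerifyX (paths : List (List (Int × Int))) :
    List ((List (Int × Int)) × (List (Int × Int))) :=
  let _midpoints := PySem.Set.ofList (paths.map pvMid)
  (PySem.List.pyRange 0 (paths.length : Int)).foldl (fun res i =>
    (PySem.List.pyRange (i + 1) (paths.length : Int)).foldl (fun res j =>
      if pvMid (PySem.List.pyGetD paths i []) == pvMid (PySem.List.pyGetD paths j []) then
        res ++ [(PySem.List.pyGetD paths i [], PySem.List.pyGetD paths j [])]
      else res) res) []

def find_diagonal_x_for_word (grid : List String) (word : String) :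
    List ((List (Int × Int)) × (List (Int × Int))) :=
  let gl := grid.map String.toList
  let rows : Int := (grid.length : Int)
  let cols : Int := ((PySem.List.pyGetD gl 0 []).length : Int)
  let w := word.toList
  let all_paths := (PySem.List.pyRange 0 rows).foldl (fun acc i =>
    (PySem.List.pyRange 0 cols).foldl (fun acc j =>
      if PySem.List.pyGetD (PySem.List.pyGetD gl i []) j ' ' == PySem.List.pyGetD w 0 ' ' then
        pvDirections.foldl (fun acc dir =>
          match pvSearchFrom gl rows cols i j w dir with
          | none => acc
          | some path => if path == [] then acc else acc ++ [path]) acc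
      else acc) acc) []
  pvVerifyX all_paths

-- ===== PORT B =====
-- recursive walk: the coordinate path for word[k:] from (x, y), none on any failure
def pvWalk (gl : List (List Char)) (rows cols dx dy : Int) :
    List Char → Int → Int → Option (List (Int × Int))
  | [], _, _ => some []
  | ch :: rest, x, y =>
    if !(decide (0 ≤ x) && decide (x < rows) && decide (0 ≤ y) && decide (y < cols)) then none
    else if PySem.List.pyGetD (PySem.List.pyGetD gl x []) y ' ' ≠ ch then none
    else match pvWalk gl rows cols dx dy rest (x + dx) (y + dy) with
      | none => none
      | some r => some ((x, y) :: r)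

def pvDeltas : List (Int × Int) := [(1, 1), (-1, -1), (1, -1), (-1, 1)]

def find_diagonal_x_for_word_alt (grid : List String) (word : String) :
    List ((List (Int × Int)) × (List (Int × Int))) :=
  let gl := grid.map String.toList
  let rows : Int := (grid.length : Int)
  let cols : Int := ((PySem.List.pyGetD gl 0 []).length : Int)
  let w := word.toList
  let paths := (PySem.List.pyRange 0 rows).flatMap (fun i =>
    (PySem.List.pyRange 0 cols).flatMap (fun j =>
      if PySem.List.pyGetD (PySem.List.pyGetD gl i []) j ' ' == PySem.List.pyGetD w 0 ' ' then
        pvDeltas.filterMap (fun d => pvWalk gl rows cols d.1 d.2 w i j)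
      else []))
  let groups := (PySem.List.enumerate paths).foldl
    (fun d q => d.modify (pvMid q.2) [] (· ++ [q.1])) PySem.Dict.empty
  (PySem.List.enumerate paths).flatMap (fun q =>
    (groups.getD (pvMid q.2) []).filterMap (fun j =>
      if q.1 < j then some (q.2, PySem.List.pyGetD paths j []) else none))

-- ===== PRECONDITION & SPEC =====
-- Pre_ is exactly where the Python A returns: a nonempty grid, no row shorter than row 0
-- (else grid[i][j] / grid[nx][ny] raises IndexError), and a nonempty word unless row 0 is
-- empty (else word[0] raises IndexError on the first visited cell).
def Pre_find_diagonal_x_for_word (grid : List String) (word : String) : Prop :=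
  grid ≠ [] ∧
  (∀ row ∈ grid, PySem.Str.len (PySem.List.pyGetD grid 0 "") ≤ PySem.Str.len row) ∧
  (word ≠ "" ∨ PySem.Str.len (PySem.List.pyGetD grid 0 "") = 0)
-- e.g. A returns on (["A"], "A") and (["AB", "AB"], "AB"); it raises IndexError on
-- ([], "A"), on (["AB", "A"], "AB") (short row) and on (["AB"], "") (empty word).
instance (grid : List String) (word : String) : Decidable (Pre_find_diagonal_x_for_word grid word) := by
  unfold Pre_find_diagonal_x_for_word; infer_instance

def pvWitness_find_diagonal_x_for_word : List String × String := (["M.S", ".A.", "M.S"], "MAS")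

def Spec_find_diagonal_x_for_word (grid : List String) (word : String) (out : List ((List (Int × Int)) × (List (Int × Int)))) : Prop := out = find_diagonal_x_for_word_alt grid word
instance (grid : List String) (word : String) (out : List ((List (Int × Int)) × (List (Int × Int)))) : Decidable (Spec_find_diagonal_x_for_word grid word out) := by unfold Spec_find_diagonal_x_for_word; infer_instance

-- ===== CLAIM (what is proved, stated in full; the proofs are below) =====
def Claim_equal_find_diagonal_x_for_word : Prop := ∀ (grid : List String) (word : String), Dom_find_diagonal_x_for_word grid word → Pre_find_diagonal_x_for_word grid word → Spec_find_diagonal_x_for_word grid word (find_diagonal_x_for_word grid word)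

-- ===== LEMMAS AND PROOFS =====

-- search_from's accumulator loop is the walk with the accumulator prepended
theorem pvSearchLoop_eq_walk (gl : List (List Char)) (rows cols dx dy : Int)
    (cs : List Char) (x y : Int) (acc : List (Int × Int)) :
    pvSearchLoop gl rows cols dx dy cs x y acc
      = (pvWalk gl rows cols dx dy cs x y).map (acc ++ ·) := by
  induction cs generalizing x y acc with
  | nil => simp [pvSearchLoop, pvWalk]
  | cons ch rest ih =>
    rw [pvSearchLoop, pvWalk, pvIsValid]
    split_ifs with h1 h2
    · simp
    · simp
    · rw [ih]
      cases hW : pvWalk gl rows cols dx dy rest (x + dx) (y + dy) <;> simp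

theorem pvWalk_cons_ne_nil {gl : List (List Char)} {rows cols dx dy : Int}
    {ch : Char} {rest : List Char} {x y : Int} {p : List (Int × Int)}
    (h : pvWalk gl rows cols dx dy (ch :: rest) x y = some p) : p ≠ [] := by
  rw [pvWalk] at h
  split_ifs at h
  revert h
  cases pvWalk gl rows cols dx dy rest (x + dx) (y + dy) with
  | none => simp_all
  | some r =>
    simp_all
    rintro rfl
    simp

-- a foldl appending the some-results of an option-valued function is a filterMap
theorem pvFoldl_match_filterMap {α β : Type} (h : α → Option β) (l : List α) (acc : List β) :
    l.foldl (fun acc x => (h x).elim acc (fun p => acc ++ [p])) acc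
      = acc ++ l.filterMap h := by
  induction l generalizing acc with
  | nil => simp
  | cons x xs ih =>
    simp only [List.foldl_cons, List.filterMap_cons]
    cases hx : h x <;> simp [ih]

-- one grid cell: A's direction loop = B's filterMap of walks, under the shared word[0] guard
theorem pvCell_eq (gl : List (List Char)) (rows cols : Int) (ch : Char) (cs : List Char)
    (i j : Int) (acc : List (List (Int × Int))) :
    (if PySem.List.pyGetD (PySem.List.pyGetD gl i []) j ' '
          == PySem.List.pyGetD (ch :: cs) 0 ' ' then
        pvDirections.foldl (fun acc dir =>
          match pvSearchFrom gl rows cols i j (ch :: cs) dir with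
          | none => acc
          | some path => if path == [] then acc else acc ++ [path]) acc
      else acc)
    = acc ++ (if PySem.List.pyGetD (PySem.List.pyGetD gl i []) j ' '
          == PySem.List.pyGetD (ch :: cs) 0 ' ' then
        pvDeltas.filterMap (fun d => pvWalk gl rows cols d.1 d.2 (ch :: cs) i j)
      else []) := by
  rw [show pvDeltas = pvDirections from rfl]
  by_cases hc : PySem.List.pyGetD (PySem.List.pyGetD gl i []) j ' '
      == PySem.List.pyGetD (ch :: cs) 0 ' '
  · rw [if_pos hc, if_pos hc]
    set hfun : Int × Int → Option (List (Int × Int)) :=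
      fun d => pvWalk gl rows cols d.1 d.2 (ch :: cs) i j with hf
    have hstep : ∀ (acc : List (List (Int × Int))), ∀ dir ∈ pvDirections,
        (match pvSearchFrom gl rows cols i j (ch :: cs) dir with
          | none => acc
          | some path => if path == [] then acc else acc ++ [path])
        = (hfun dir).elim acc (fun p => acc ++ [p]) := by
      intro acc dir _
      rw [pvSearchFrom, pvSearchLoop_eq_walk, hf]
      cases hW : pvWalk gl rows cols dir.1 dir.2 (ch :: cs) i j with
      | none => simp [hW]
      | some p =>
        have hne := pvWalk_cons_ne_nil hW
        simp [hW, hne]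
    rw [PySem.List.foldl_congr_mem _ _ _ _ hstep]
    exact pvFoldl_match_filterMap hfun pvDirections acc
  · rw [if_neg hc, if_neg hc]
    simp

-- the whole scan: A's nested append-loops = B's nested flatMap of walks
theorem pvScan_eq (gl : List (List Char)) (rows cols : Int) (w : List Char)
    (hw : w ≠ [] ∨ cols ≤ 0) :
    (PySem.List.pyRange 0 rows).foldl (fun acc i =>
      (PySem.List.pyRange 0 cols).foldl (fun acc j =>
        if PySem.List.pyGetD (PySem.List.pyGetD gl i []) j ' '
            == PySem.List.pyGetD w 0 ' ' then
          pvDirections.foldl (fun acc dir =>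
            match pvSearchFrom gl rows cols i j w dir with
            | none => acc
            | some path => if path == [] then acc else acc ++ [path]) acc
        else acc) acc) []
    = (PySem.List.pyRange 0 rows).flatMap (fun i =>
      (PySem.List.pyRange 0 cols).flatMap (fun j =>
        if PySem.List.pyGetD (PySem.List.pyGetD gl i []) j ' '
            == PySem.List.pyGetD w 0 ' ' then
          pvDeltas.filterMap (fun d => pvWalk gl rows cols d.1 d.2 w i j)
        else [])) := by
  have houter : ∀ (acc : List (List (Int × Int))), ∀ i ∈ PySem.List.pyRange 0 rows,
      (PySem.List.pyRange 0 cols).foldl (fun acc j =>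
        if PySem.List.pyGetD (PySem.List.pyGetD gl i []) j ' '
            == PySem.List.pyGetD w 0 ' ' then
          pvDirections.foldl (fun acc dir =>
            match pvSearchFrom gl rows cols i j w dir with
            | none => acc
            | some path => if path == [] then acc else acc ++ [path]) acc
        else acc) acc
      = acc ++ (PySem.List.pyRange 0 cols).flatMap (fun j =>
          if PySem.List.pyGetD (PySem.List.pyGetD gl i []) j ' '
              == PySem.List.pyGetD w 0 ' ' then
            pvDeltas.filterMap (fun d => pvWalk gl rows cols d.1 d.2 w i j)
          else []) := by
    intro acc i hi
    have hinner : ∀ (acc : List (List (Int × Int))), ∀ j ∈ PySem.List.pyRange 0 cols,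
        (if PySem.List.pyGetD (PySem.List.pyGetD gl i []) j ' '
            == PySem.List.pyGetD w 0 ' ' then
          pvDirections.foldl (fun acc dir =>
            match pvSearchFrom gl rows cols i j w dir with
            | none => acc
            | some path => if path == [] then acc else acc ++ [path]) acc
        else acc)
        = acc ++ (if PySem.List.pyGetD (PySem.List.pyGetD gl i []) j ' '
              == PySem.List.pyGetD w 0 ' ' then
            pvDeltas.filterMap (fun d => pvWalk gl rows cols d.1 d.2 w i j)
          else []) := by
      intro acc j hj
      obtain ⟨hj0, hj1⟩ := PySem.List.mem_pyRange_one.mp hj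
      have hcols : ¬ cols ≤ 0 := by omega
      rcases hw with hw | hw
      · cases w with
        | nil => exact absurd rfl hw
        | cons ch cs => exact pvCell_eq gl rows cols ch cs i j acc
      · exact absurd hw hcols
    rw [PySem.List.foldl_congr_mem _ _ _ _ hinner]
    exact PySem.List.foldl_append_eq_flatMap _ _ _
  rw [PySem.List.foldl_congr_mem _ _ _ _ houter]
  exact (PySem.List.foldl_append_eq_flatMap _ _ _).trans (by simp)

theorem pvFilterMap_if_nil {α β : Type} (p : α → Prop) [DecidablePred p] (g : α → β)
    (l : List α) (h : ∀ x ∈ l, ¬ p x) :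
    l.filterMap (fun x => if p x then some (g x) else none) = [] := by
  rw [List.filterMap_eq_nil_iff]
  intro a ha; simp [h a ha]

theorem pvFilterMap_if_map {α β : Type} (p : α → Prop) [DecidablePred p] (g : α → β)
    (l : List α) (h : ∀ x ∈ l, p x) :
    l.filterMap (fun x => if p x then some (g x) else none) = l.map g := by
  induction l with
  | nil => simp
  | cons x xs ih =>
    simp only [List.filterMap_cons, if_pos (h x (by simp))]
    simp [ih (fun a ha => h a (by simp [ha]))]

-- the grouping dict read back: indices of the paths with the given midpoint, in order
theorem pvGroups_getD (P : List (List (Int × Int))) (m : Int × Int) :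
    ((PySem.List.enumerate P).foldl
        (fun d q => d.modify (pvMid q.2) [] (· ++ [q.1])) PySem.Dict.empty).getD m []
      = (PySem.List.pyRange 0 (PySem.List.len P)).filter
          (fun j => pvMid (PySem.List.pyGetD P j []) == m) := by
  rw [PySem.List.enumerate_eq_map_pyRange P [], List.foldl_map]
  rw [show (fun (d : PySem.Dict (Int × Int) (List Int)) (j : Int) =>
        d.modify (pvMid (PySem.List.pyGetD P j [])) [] (· ++ [j]))
      = (fun d j => d.modify ((fun j => (pvMid (PySem.List.pyGetD P j []), j)) j).1 []
          (· ++ [((fun j => (pvMid (PySem.List.pyGetD P j []), j)) j).2])) from rfl,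
    ← List.foldl_map (f := fun j => (pvMid (PySem.List.pyGetD P j []), j))
      (g := fun (d : PySem.Dict (Int × Int) (List Int)) (p : (Int × Int) × Int) =>
        d.modify p.1 [] (· ++ [p.2]))]
  rw [PySem.Dict.getD_foldl_modify_append]
  simp only [PySem.Dict.getD_empty, List.filter_map, List.map_map, Function.comp_def,
    List.nil_append]
  rw [List.map_id']

-- the pair stage: A's i < j double loop = B's per-midpoint group walk
theorem pvPairs_eq (P : List (List (Int × Int))) :
    pvVerifyX P = (PySem.List.enumerate P).flatMap (fun q =>
      (((PySem.List.enumerate P).foldl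
          (fun d q => d.modify (pvMid q.2) [] (· ++ [q.1])) PySem.Dict.empty).getD
            (pvMid q.2) []).filterMap (fun j =>
        if q.1 < j then some (q.2, PySem.List.pyGetD P j []) else none)) := by
  have hlen : PySem.List.len P = (P.length : Int) := by simp [PySem.List.len]
  have hB : (PySem.List.enumerate P).flatMap (fun q =>
      (((PySem.List.enumerate P).foldl
          (fun d q => d.modify (pvMid q.2) [] (· ++ [q.1])) PySem.Dict.empty).getD
            (pvMid q.2) []).filterMap (fun j =>
        if q.1 < j then some (q.2, PySem.List.pyGetD P j []) else none))
      = (PySem.List.pyRange 0 (P.length : Int)).flatMap (fun i =>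
          ((PySem.List.pyRange 0 (P.length : Int)).filter
            (fun j => pvMid (PySem.List.pyGetD P j []) == pvMid (PySem.List.pyGetD P i []))).filterMap
          (fun j => if i < j then some (PySem.List.pyGetD P i [], PySem.List.pyGetD P j []) else none)) := by
    rw [List.flatMap_congr (fun q _ => by rw [pvGroups_getD P (pvMid q.2)])]
    rw [PySem.List.enumerate_eq_map_pyRange P [], List.flatMap_map, hlen]
  rw [hB]
  have hA : pvVerifyX P
      = (PySem.List.pyRange 0 (P.length : Int)).flatMap (fun i =>
          ((PySem.List.pyRange (i + 1) (P.length : Int)).filter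
            (fun j => pvMid (PySem.List.pyGetD P i []) == pvMid (PySem.List.pyGetD P j []))).map
          (fun j => (PySem.List.pyGetD P i [], PySem.List.pyGetD P j []))) := by
    rw [show pvVerifyX P = (PySem.List.pyRange 0 (P.length : Int)).foldl (fun res i =>
      (PySem.List.pyRange (i + 1) (P.length : Int)).foldl (fun res j =>
        if pvMid (PySem.List.pyGetD P i []) == pvMid (PySem.List.pyGetD P j []) then
          res ++ [(PySem.List.pyGetD P i [], PySem.List.pyGetD P j [])]
        else res) res) [] from rfl]
    have houter : ∀ (res : List ((List (Int × Int)) × (List (Int × Int)))),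
        ∀ i ∈ PySem.List.pyRange 0 (P.length : Int),
        (PySem.List.pyRange (i + 1) (P.length : Int)).foldl (fun res j =>
          if pvMid (PySem.List.pyGetD P i []) == pvMid (PySem.List.pyGetD P j []) then
            res ++ [(PySem.List.pyGetD P i [], PySem.List.pyGetD P j [])]
          else res) res
        = res ++ ((PySem.List.pyRange (i + 1) (P.length : Int)).filter
            (fun j => pvMid (PySem.List.pyGetD P i []) == pvMid (PySem.List.pyGetD P j []))).map
          (fun j => (PySem.List.pyGetD P i [], PySem.List.pyGetD P j [])) := by
      intro res i _
      exact PySem.List.foldl_append_if _ _ _ _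
    rw [PySem.List.foldl_congr_mem _ _ _ _ houter]
    exact (PySem.List.foldl_append_eq_flatMap _ _ _).trans (by simp)
  rw [hA]
  refine (List.flatMap_congr ?_).symm
  intro i hi
  obtain ⟨hi0, hi1⟩ := PySem.List.mem_pyRange_one.mp hi
  rw [PySem.List.pyRange_one_append 0 (i + 1) (P.length : Int) (by omega) (by omega),
    List.filter_append, List.filterMap_append]
  rw [pvFilterMap_if_nil (fun j => i < j) _ _ (by
    intro x hx
    have hx' := PySem.List.mem_pyRange_one.mp (List.mem_filter.mp hx).1
    omega)]
  rw [pvFilterMap_if_map (fun j => i < j) _ _ (by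
    intro x hx
    have hx' := PySem.List.mem_pyRange_one.mp (List.mem_filter.mp hx).1
    omega)]
  rw [List.filter_congr (fun j _ => by simp [eq_comm] :
    ∀ j ∈ PySem.List.pyRange (i + 1) (P.length : Int),
      (pvMid (PySem.List.pyGetD P j []) == pvMid (PySem.List.pyGetD P i []))
        = (pvMid (PySem.List.pyGetD P i []) == pvMid (PySem.List.pyGetD P j [])))]
  simp

-- ===== VERDICT (by name: the statement is the Claim_ definition above) =====
theorem find_diagonal_x_for_word_spec : Claim_equal_find_diagonal_x_for_word := by
  intro grid word _ hpre
  unfold Spec_find_diagonal_x_for_word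
  obtain ⟨-, -, hw⟩ := hpre
  have hrow0 : PySem.List.pyGetD (grid.map String.toList) 0 []
      = (PySem.List.pyGetD grid 0 "").toList := by
    have := PySem.List.pyGetD_map String.toList grid 0 ""
    simpa using this
  have hw' : word.toList ≠ []
      ∨ (((PySem.List.pyGetD (grid.map String.toList) 0 []).length : Int) ≤ 0) := by
    rcases hw with hw | hw
    · exact Or.inl (by simpa using (String.toList_inj (s₁ := word) (s₂ := "")).ne.mpr hw)
    · right
      rw [PySem.Str.len_eq] at hw
      rw [hrow0]
      omega
  simp only [find_diagonal_x_for_word, find_diagonal_x_for_word_alt]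
  rw [pvScan_eq _ _ _ _ hw', pvPairs_eq]
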